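-- pv_equiv track=rewrite | github.com/qtproject/pyside-pyside-setup | tools/snippets_translate/parse_utils.py | replace_main_commas
-- ===== SOURCE A (Python) =====
-- def replace_main_commas(v):
--     #   : QWidget(parent), Something(else, and, other), value(1)
--     new_v = ""
--     parenthesis = 0
--     for c in v:
--         if c == "(":
--             parenthesis += 1
--         elif c == ")":
--             parenthesis -= 1
--
--         if c == "," and parenthesis == 0:
--             c = "@"
--
--         new_v += c
--
--     return new_v
-- ===== SOURCE B (Python) =====
-- def replace_main_commas(v):
--     # Two-phase: materialise the running parenthesis depth per character,
--     # then map each character through the depth table.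
--     depths = []
--     d = 0
--     for c in v:
--         d += 1 if c == "(" else -1 if c == ")" else 0
--         depths.append(d)
--     return "".join("@" if c == "," and d == 0 else c for c, d in zip(v, depths))
-- ===== Notes on version B (the rewrite author's own statement) =====
-- stated objective: alternative
-- what changed: B first materialises a per-character running parenthesis-depth table in one pass, then a separate zip/join pass rewrites top-level commas; A interleaves depth counting and output building in a single loop.
import Mathlib
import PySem

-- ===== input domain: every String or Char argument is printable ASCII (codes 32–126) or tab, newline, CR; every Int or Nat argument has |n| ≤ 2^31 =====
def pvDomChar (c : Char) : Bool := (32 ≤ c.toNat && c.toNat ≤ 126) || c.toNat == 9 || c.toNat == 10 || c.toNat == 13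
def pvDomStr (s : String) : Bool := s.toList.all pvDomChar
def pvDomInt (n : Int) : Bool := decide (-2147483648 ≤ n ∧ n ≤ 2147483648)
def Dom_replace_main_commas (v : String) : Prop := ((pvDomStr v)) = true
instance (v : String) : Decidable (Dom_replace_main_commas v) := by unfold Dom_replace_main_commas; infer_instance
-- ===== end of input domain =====

-- B rewrites A's single interleaved loop as two phases: a pass that materialises the
-- per-character running parenthesis depth, then a zip/map pass producing the output.

-- ===== PORT A =====
-- single loop carrying (new_v, parenthesis); new_v += c is String.push
def replace_main_commas (v : String) : String :=
  (v.toList.foldl (fun (st : String × Int) c =>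
      let parenthesis : Int :=
        if c = '(' then st.2 + 1 else if c = ')' then st.2 - 1 else st.2
      let c' : Char := if c = ',' ∧ parenthesis = 0 then '@' else c
      (st.1.push c', parenthesis)) ("", 0)).1

-- ===== PORT B =====
-- pass 1: build the depth table; pass 2: zip with the original characters and map
def replace_main_commas_alt (v : String) : String :=
  let depths : List Int :=
    (v.toList.foldl (fun (st : Int × List Int) c =>
        let d : Int := st.1 + (if c = '(' then 1 else if c = ')' then -1 else 0)
        (d, st.2 ++ [d])) (0, [])).2
  String.mk ((v.toList.zip depths).map (fun cd =>
      if cd.1 = ',' ∧ cd.2 = 0 then '@' else cd.1))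

-- ===== PRECONDITION & SPEC =====
def Spec_replace_main_commas (v : String) (out : String) : Prop := out = replace_main_commas_alt v
instance (v : String) (out : String) : Decidable (Spec_replace_main_commas v out) := by unfold Spec_replace_main_commas; infer_instance

-- ===== CLAIM (what is proved, stated in full; the proofs are below) =====
def Claim_equal_replace_main_commas : Prop := ∀ (v : String), Dom_replace_main_commas v → Spec_replace_main_commas v (replace_main_commas v)

-- ===== LEMMAS AND PROOFS =====

-- the per-character delta
def pvDelta (c : Char) : Int := if c = '(' then 1 else if c = ')' then -1 else 0

-- recursive form of the depth table starting from depth d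
def pvScan : List Char → Int → List Int
  | [], _ => []
  | c :: t, d => (d + pvDelta c) :: pvScan t (d + pvDelta c)

theorem pvB_foldl_eq (l : List Char) : ∀ (d : Int) (acc : List Int),
    (l.foldl (fun (st : Int × List Int) c =>
        let d' : Int := st.1 + (if c = '(' then 1 else if c = ')' then -1 else 0)
        (d', st.2 ++ [d'])) (d, acc)) = (d + (l.map pvDelta).sum, acc ++ pvScan l d) := by
  induction l with
  | nil => intro d acc; simp [pvScan]
  | cons c t ih =>
    intro d acc
    simp only [List.foldl, pvScan, List.map, List.sum_cons]
    rw [ih]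
    simp only [Prod.mk.injEq, pvDelta, List.append_assoc, List.singleton_append]
    exact ⟨by ring, trivial⟩

theorem pvA_foldl_eq (l : List Char) : ∀ (d : Int) (s : String),
    (l.foldl (fun (st : String × Int) c =>
        let p : Int := if c = '(' then st.2 + 1 else if c = ')' then st.2 - 1 else st.2
        let c' : Char := if c = ',' ∧ p = 0 then '@' else c
        (st.1.push c', p)) (s, d)) =
      (String.mk (s.toList ++ (l.zip (pvScan l d)).map (fun cd =>
          if cd.1 = ',' ∧ cd.2 = 0 then '@' else cd.1)),
       d + (l.map pvDelta).sum) := by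
  induction l with
  | nil => intro d s; simp; exact String.ofList_toList.symm
  | cons c t ih =>
    intro d s
    simp only [List.foldl, pvScan, List.zip_cons_cons, List.map, List.sum_cons]
    rw [ih]
    have hp : (if c = '(' then d + 1 else if c = ')' then d - 1 else d) = d + pvDelta c := by
      simp [pvDelta]; split_ifs <;> ring
    rw [hp]
    simp only [Prod.mk.injEq, String.toList_push, List.append_assoc,
      List.cons_append]
    exact ⟨rfl, by ring⟩

-- ===== VERDICT (by name: the statement is the Claim_ definition above) =====
theorem replace_main_commas_spec : Claim_equal_replace_main_commas := by
  intro v _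
  show replace_main_commas v = replace_main_commas_alt v
  unfold replace_main_commas replace_main_commas_alt
  rw [pvA_foldl_eq, pvB_foldl_eq]
  simp
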